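-- pv_equiv track=rewrite | github.com/lcapossio/fpgacapZero | tests/test_gui_hw_capture.py | _best_sequential_counter_run_low8
-- ===== SOURCE A (Python) =====
-- def _best_sequential_counter_run_low8(samples: list[int]) -> int:
--     """Length of longest run of +1 (mod 256) steps in low 8 bits (Arty counter probe)."""
--     vals = [s & 0xFF for s in samples]
--     if not vals:
--         return 0
--     best_run = 0
--     current_run = 1
--     for i in range(1, len(vals)):
--         if (vals[i] - vals[i - 1]) & 0xFF == 1:
--             current_run += 1
--         else:
--             best_run = max(best_run, current_run)
--             current_run = 1
--     return max(best_run, current_run)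
-- ===== SOURCE B (Python) =====
-- def _best_sequential_counter_run_low8(samples: list[int]) -> int:
--     """Suffix-run DP: runs[i] = length of the +1 (mod 256) run starting at i; answer is max(runs)."""
--     vals = [s & 0xFF for s in samples]
--     runs = [0] * len(vals)
--     for i in range(len(vals) - 1, -1, -1):
--         if i + 1 < len(vals) and (vals[i + 1] - vals[i]) & 0xFF == 1:
--             runs[i] = runs[i + 1] + 1
--         else:
--             runs[i] = 1
--     return max(runs, default=0)
-- ===== Notes on version B (the rewrite author's own statement) =====
-- stated objective: alternative
-- what changed: Replaced the forward scan that maintains a (best_run, current_run) accumulator pair with a right-to-left dynamic program that materializes the suffix run-length table runs[i] = length of the +1 (mod 256) run starting at i and returns its maximum.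
import Mathlib
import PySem

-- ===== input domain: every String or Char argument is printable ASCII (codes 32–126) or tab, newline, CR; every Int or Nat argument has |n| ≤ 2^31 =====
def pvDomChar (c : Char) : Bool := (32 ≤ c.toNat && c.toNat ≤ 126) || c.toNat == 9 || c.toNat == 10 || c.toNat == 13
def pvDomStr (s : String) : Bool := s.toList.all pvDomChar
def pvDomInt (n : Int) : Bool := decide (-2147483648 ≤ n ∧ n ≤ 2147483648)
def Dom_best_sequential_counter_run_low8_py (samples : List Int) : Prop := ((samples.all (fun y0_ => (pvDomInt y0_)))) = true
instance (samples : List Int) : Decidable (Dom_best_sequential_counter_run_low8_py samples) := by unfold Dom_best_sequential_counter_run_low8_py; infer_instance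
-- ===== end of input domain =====

-- B replaces A's forward (best_run, current_run) scan by a right-to-left suffix run-length table
-- followed by a max; same O(n) cost, different decomposition (objective: alternative).

-- ===== PORT A =====
def best_sequential_counter_run_low8_py (samples : List Int) : Int :=
  let vals := samples.map (fun s => PySem.Int.band s 255)
  if vals = [] then 0
  else
    let st := (PySem.List.pyRange 1 (PySem.List.len vals) 1).foldl
      (fun (st : Int × Int) i =>
        if PySem.Int.band (PySem.List.pyGetD vals i 0 - PySem.List.pyGetD vals (i - 1) 0) 255 == 1
        then (st.1, st.2 + 1)
        else (max st.1 st.2, 1))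
      (0, 1)
    max st.1 st.2

-- ===== PORT B =====
-- runs[i] = runs[i+1] + 1 if the step i → i+1 is +1 (mod 256), else 1; built right-to-left.
def pvAltRuns : List Int → List Int
  | [] => []
  | v :: rest =>
      match pvAltRuns rest, rest with
      | r :: rs, w :: _ => (if PySem.Int.band (w - v) 255 == 1 then r + 1 else 1) :: r :: rs
      | _, _ => [1]

def best_sequential_counter_run_low8_py_alt (samples : List Int) : Int :=
  let vals := samples.map (fun s => PySem.Int.band s 255)
  match PySem.List.max? (pvAltRuns vals) (fun x => x) with
  | some m => m
  | none => 0

-- ===== PRECONDITION & SPEC =====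
def Spec_best_sequential_counter_run_low8_py (samples : List Int) (out : Int) : Prop := out = best_sequential_counter_run_low8_py_alt samples
instance (samples : List Int) (out : Int) : Decidable (Spec_best_sequential_counter_run_low8_py samples out) := by unfold Spec_best_sequential_counter_run_low8_py; infer_instance

-- ===== CLAIM (what is proved, stated in full; the proofs are below) =====
def Claim_equal_best_sequential_counter_run_low8_py : Prop := ∀ (samples : List Int), Dom_best_sequential_counter_run_low8_py samples → Spec_best_sequential_counter_run_low8_py samples (best_sequential_counter_run_low8_py samples)

-- ===== LEMMAS AND PROOFS =====

-- A's loop body, recast as structural recursion over the suffix being scanned.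
def pvScanA (st : Int × Int) (prev : Int) : List Int → Int × Int
  | [] => st
  | w :: t =>
      if PySem.Int.band (w - prev) 255 == 1 then pvScanA (st.1, st.2 + 1) w t
      else pvScanA (max st.1 st.2, 1) w t

theorem pvAltRuns_singleton (v : Int) : pvAltRuns [v] = [1] := rfl

theorem pvAltRuns_cons_ne_nil (v : Int) (rest : List Int) : pvAltRuns (v :: rest) ≠ [] := by
  unfold pvAltRuns
  rcases pvAltRuns rest with _ | ⟨r, rs⟩ <;> rcases rest with _ | ⟨w, tt⟩ <;> simp

theorem pvAltRuns_cons_cons (v w : Int) (t : List Int) (r : Int) (rs : List Int)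
    (h : pvAltRuns (w :: t) = r :: rs) :
    pvAltRuns (v :: w :: t) = (if PySem.Int.band (w - v) 255 == 1 then r + 1 else 1) :: r :: rs := by
  conv_lhs => unfold pvAltRuns
  rw [h]

theorem pvAltRuns_pos (l : List Int) : ∀ x ∈ pvAltRuns l, 1 ≤ x := by
  induction l with
  | nil => simp [pvAltRuns]
  | cons v rest ih =>
    cases rest with
    | nil => simp [pvAltRuns_singleton]
    | cons w t =>
      rcases h : pvAltRuns (w :: t) with _ | ⟨r, rs⟩
      · exact absurd h (pvAltRuns_cons_ne_nil w t)
      · rw [pvAltRuns_cons_cons v w t r rs h]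
        intro x hx
        rcases List.mem_cons.mp hx with hx | hx
        · subst hx
          have hr : 1 ≤ r := ih r (by rw [h]; exact List.mem_cons_self)
          split <;> omega
        · exact ih x (by rw [h]; exact hx)

-- Bridge A's index loop to pvScanA.
theorem pv_loopA (suffix : List Int) :
    ∀ (pre xs : List Int) (prev : Int) (st : Int × Int),
      xs = pre ++ prev :: suffix →
      (PySem.List.pyRange ((pre.length : Int) + 1) ((pre.length : Int) + 1 + suffix.length) 1).foldl
        (fun (st : Int × Int) i =>
          if PySem.Int.band (PySem.List.pyGetD xs i 0
               - PySem.List.pyGetD xs (i - 1) 0) 255 == 1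
          then (st.1, st.2 + 1)
          else (max st.1 st.2, 1)) st
      = pvScanA st prev suffix := by
  induction suffix with
  | nil =>
    intro pre xs prev st hxs
    rw [PySem.List.pyRange_one_eq_nil (by simp)]
    simp [pvScanA]
  | cons w t ih =>
    intro pre xs prev st hxs
    rw [PySem.List.pyRange_one_cons (by simp only [List.length_cons]; push_cast; omega)]
    rw [List.foldl_cons]
    have hget1 : PySem.List.pyGetD xs ((pre.length : Int) + 1) 0 = w := by
      have e : (pre.length : Int) + 1 = ((pre.length + 1 : Nat) : Int) := by push_cast; ring
      rw [hxs, e, PySem.List.pyGetD_natCast]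
      rw [List.getD_eq_getElem?_getD, List.getElem?_append_right (by omega)]
      simp
    have hget0 : PySem.List.pyGetD xs ((pre.length : Int) + 1 - 1) 0 = prev := by
      have e : (pre.length : Int) + 1 - 1 = ((pre.length : Nat) : Int) := by ring
      rw [hxs, e, PySem.List.pyGetD_natCast]
      rw [List.getD_eq_getElem?_getD, List.getElem?_append_right (by omega)]
      simp
    rw [hget1, hget0]
    have e1 : (pre.length : Int) + 1 + 1 = (((pre ++ [prev]).length : Int) + 1) := by
      simp
    have e2 : (pre.length : Int) + 1 + ((w :: t).length : Int) = ((pre ++ [prev]).length : Int) + 1 + (t.length : Int) := by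
      simp
      ring
    rw [e1, e2]
    have hxs' : xs = (pre ++ [prev]) ++ w :: t := by rw [hxs]; simp
    by_cases hc : (PySem.Int.band (w - prev) 255 == 1) = true
    · rw [if_pos hc, ih (pre ++ [prev]) xs w (st.1, st.2 + 1) hxs']
      simp [pvScanA, hc]
    · rw [if_neg hc, ih (pre ++ [prev]) xs w (max st.1 st.2, 1) hxs']
      simp [pvScanA, hc]

-- Main invariant: the final max of A's scan is a running max over B's run table.
theorem pv_main (rest : List Int) :
    ∀ (v best cur : Int), 1 ≤ cur →
      max (pvScanA (best, cur) v rest).1 (pvScanA (best, cur) v rest).2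
      = (pvAltRuns (v :: rest)).tail.foldl max
          (max best (cur - 1 + (pvAltRuns (v :: rest)).headD 0)) := by
  induction rest with
  | nil =>
    intro v best cur _
    have e : cur - 1 + 1 = cur := by ring
    simp [pvScanA, pvAltRuns, e]
  | cons w t ih =>
    intro v best cur hcur
    rcases h : pvAltRuns (w :: t) with _ | ⟨r, rs⟩
    · exact absurd h (pvAltRuns_cons_ne_nil w t)
    have hr1 : 1 ≤ r := pvAltRuns_pos (w :: t) r (by rw [h]; exact List.mem_cons_self)
    rw [pvAltRuns_cons_cons v w t r rs h]
    by_cases hc : (PySem.Int.band (w - v) 255 == 1) = true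
    · rw [if_pos hc]
      simp only [List.tail_cons, List.headD_cons, List.foldl_cons]
      have lhs_eq : pvScanA (best, cur) v (w :: t) = pvScanA (best, cur + 1) w t := by
        simp [pvScanA, hc]
      rw [lhs_eq, ih w best (cur + 1) (by omega), h]
      simp only [List.tail_cons, List.headD_cons]
      congr 1
      have e : cur - 1 + (r + 1) = cur + 1 - 1 + r := by ring
      rw [e, max_assoc]
      congr 1
      have : r ≤ cur + 1 - 1 + r := by omega
      exact (max_eq_left this).symm
    · rw [if_neg hc]
      simp only [List.tail_cons, List.headD_cons, List.foldl_cons]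
      have lhs_eq : pvScanA (best, cur) v (w :: t) = pvScanA (max best cur, 1) w t := by
        simp [pvScanA, hc]
      rw [lhs_eq, ih w (max best cur) 1 le_rfl, h]
      simp only [List.tail_cons, List.headD_cons]
      congr 1
      have e1 : cur - 1 + 1 = cur := by ring
      have e2 : (1 : Int) - 1 + r = r := by ring
      rw [e1, e2]

-- ===== VERDICT (by name: the statement is the Claim_ definition above) =====
theorem best_sequential_counter_run_low8_py_spec : Claim_equal_best_sequential_counter_run_low8_py := by
  intro samples _
  unfold Spec_best_sequential_counter_run_low8_py
  unfold best_sequential_counter_run_low8_py best_sequential_counter_run_low8_py_alt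
  cases hv : samples.map (fun s => PySem.Int.band s 255) with
  | nil => simp [pvAltRuns, PySem.List.max?]
  | cons v rest =>
    simp only []
    rw [if_neg (by simp)]
    rcases h : pvAltRuns (v :: rest) with _ | ⟨hd, tl⟩
    · exact absurd h (pvAltRuns_cons_ne_nil v rest)
    simp only [PySem.List.max?_id_cons]
    have hloop := pv_loopA rest [] (v :: rest) v (0, 1) rfl
    simp only [List.length_nil, Nat.cast_zero, zero_add] at hloop
    simp only [PySem.List.len_eq, List.length_cons]
    rw [show (1 : Int) + ((rest.length : Nat) : Int) = ((rest.length + 1 : Nat) : Int) by push_cast; ring] at hloop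
    rw [hloop]
    have hmain := pv_main rest v 0 1 le_rfl
    rw [h] at hmain
    simp only [List.headD_cons, List.tail_cons] at hmain
    rw [hmain]
    have hhd : 1 ≤ hd := pvAltRuns_pos (v :: rest) hd (by rw [h]; exact List.mem_cons_self)
    congr 1
    have e : (1 : Int) - 1 + hd = hd := by ring
    rw [e]
    exact max_eq_right (by omega)
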